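-- pv_equiv track=rewrite | github.com/vaalmo/stocksalmon | functions/fen_analyzer.py | _bishop_colors_from_board
-- ===== SOURCE A (Python) =====
-- from typing import Iterable, Tuple
--
-- def _bishop_colors_from_board(board: str) -> Tuple[set[str], set[str]]:
--     """Return sets of colors {'light','dark'} where bishops reside for white/black.
--     Board is the first FEN field. Assumes 'a1' is dark; color = 'dark' if (file+rank)%2==0.
--     """
--     white, black = set(), set()
--     ranks = board.split("/")  # rank 8 .. 1
--     for r_idx, rank in enumerate(ranks):
--         file_idx = 0
--         for ch in rank:
--             if ch.isdigit():
--                 file_idx += int(ch)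
--                 continue
--             # piece occupies current square
--             color = "dark" if (file_idx + r_idx) % 2 == 0 else "light"
--             if ch == "B":
--                 white.add(color)
--             elif ch == "b":
--                 black.add(color)
--             file_idx += 1
--     return white, black
-- ===== SOURCE B (Python) =====
-- from typing import Tuple
--
-- def _bishop_colors_from_board(board: str) -> Tuple[set, set]:
--     """Expand each rank (digits become placeholder runs) so enumerate gives the file index directly."""
--     white, black = set(), set()
--     for r_idx, rank in enumerate(board.split("/")):
--         expanded = "".join("." * int(ch) if ch.isdigit() else ch for ch in rank)
--         for f_idx, ch in enumerate(expanded):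
--             if ch == "B":
--                 white.add("dark" if (f_idx + r_idx) % 2 == 0 else "light")
--             elif ch == "b":
--                 black.add("dark" if (f_idx + r_idx) % 2 == 0 else "light")
--     return white, black
-- ===== Notes on version B (the rewrite author's own statement) =====
-- stated objective: simpler
-- what changed: B materializes each rank by expanding digits into runs of a neutral placeholder and enumerates the expanded row, so the file index is the enumeration position and the running-counter/digit-skip logic disappears from the piece loop.
import Mathlib
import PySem

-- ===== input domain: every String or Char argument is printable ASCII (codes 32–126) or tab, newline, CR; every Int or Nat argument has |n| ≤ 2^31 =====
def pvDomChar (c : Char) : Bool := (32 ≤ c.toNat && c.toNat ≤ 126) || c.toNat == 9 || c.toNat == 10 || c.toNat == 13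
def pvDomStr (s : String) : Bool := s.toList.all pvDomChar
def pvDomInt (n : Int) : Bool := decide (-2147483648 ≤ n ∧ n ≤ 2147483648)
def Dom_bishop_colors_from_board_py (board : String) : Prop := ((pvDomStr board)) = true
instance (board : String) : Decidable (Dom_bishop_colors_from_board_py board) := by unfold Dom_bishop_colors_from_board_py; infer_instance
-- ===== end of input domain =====

-- ===== PORT A =====
-- B differs from A only in decomposition: B expands digit runs to neutral placeholder squares and
-- enumerates; return-value equivalence is proved (both return two Python sets).
-- int(ch) for a single digit char is ported as (PySem.Int.ofChars? [ch]).getD 0 (exact: always some on a digit).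
def pvStepA (r : Int) (q : (PySem.Set String × PySem.Set String) × Int) (ch : Char) :
    (PySem.Set String × PySem.Set String) × Int :=
  if PySem.Chars.isdigit ch then
    (q.1, q.2 + (PySem.Int.ofChars? [ch]).getD 0)
  else
    let color := if PySem.Int.mod (q.2 + r) 2 == 0 then "dark" else "light"
    if ch == 'B' then ((PySem.Set.add q.1.1 color, q.1.2), q.2 + 1)
    else if ch == 'b' then ((q.1.1, PySem.Set.add q.1.2 color), q.2 + 1)
    else (q.1, q.2 + 1)

def bishop_colors_from_board_py (board : String) : List String × List String :=
  -- ranks = board.split("/"); sep "/" is nonempty, so split? is always some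
  (PySem.List.enumerate ((PySem.Str.split? board "/").getD []) 0).foldl
    (fun st p => (p.2.toList.foldl (pvStepA p.1) (st, 0)).1)
    (PySem.Set.empty, PySem.Set.empty)

-- ===== PORT B =====
def pvExpand (rank : List Char) : List Char :=
  rank.flatMap fun ch =>
    if PySem.Chars.isdigit ch then PySem.List.pyRepeat ['.'] ((PySem.Int.ofChars? [ch]).getD 0)
    else [ch]

def pvStepB (r : Int) (st : PySem.Set String × PySem.Set String) (q : Int × Char) :
    PySem.Set String × PySem.Set String :=
  if q.2 == 'B' then
    (PySem.Set.add st.1 (if PySem.Int.mod (q.1 + r) 2 == 0 then "dark" else "light"), st.2)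
  else if q.2 == 'b' then
    (st.1, PySem.Set.add st.2 (if PySem.Int.mod (q.1 + r) 2 == 0 then "dark" else "light"))
  else st

def bishop_colors_from_board_py_alt (board : String) : List String × List String :=
  (PySem.List.enumerate ((PySem.Str.split? board "/").getD []) 0).foldl
    (fun st p => (PySem.List.enumerate (pvExpand p.2.toList) 0).foldl (pvStepB p.1) st)
    (PySem.Set.empty, PySem.Set.empty)

-- ===== PRECONDITION & SPEC =====
def Spec_bishop_colors_from_board_py (board : String) (out : List String × List String) : Prop := out = bishop_colors_from_board_py_alt board
instance (board : String) (out : List String × List String) : Decidable (Spec_bishop_colors_from_board_py board out) := by unfold Spec_bishop_colors_from_board_py; infer_instance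

-- ===== CLAIM (what is proved, stated in full; the proofs are below) =====
def Claim_equal_bishop_colors_from_board_py : Prop := ∀ (board : String), Dom_bishop_colors_from_board_py board → Spec_bishop_colors_from_board_py board (bishop_colors_from_board_py board)

-- ===== LEMMAS AND PROOFS =====
theorem pvOfCharsDigit (c : Char) (h : PySem.Chars.isdigit c = true) :
    PySem.Int.ofChars? [c] = some ((c.toNat : Int) - 48) := by
  simp [PySem.Chars.isdigit, Char.le_def] at h
  obtain ⟨h1, h2⟩ := h
  rw [UInt32.le_iff_toNat_le] at h1 h2
  have e1 : (48:UInt32).toNat = 48 := rfl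
  have e2 : (57:UInt32).toNat = 57 := rfl
  have hc : c.val.toNat = 48 ∨ c.val.toNat = 49 ∨ c.val.toNat = 50 ∨ c.val.toNat = 51 ∨ c.val.toNat = 52 ∨ c.val.toNat = 53 ∨ c.val.toNat = 54 ∨ c.val.toNat = 55 ∨ c.val.toNat = 56 ∨ c.val.toNat = 57 := by omega
  have key : ∀ (d : Char), c.val.toNat = d.val.toNat → c = d := by
    intro d hd; exact Char.ext (UInt32.toNat_inj.mp hd)
  rcases hc with h|h|h|h|h|h|h|h|h|h
  · rw [key '0' h]; decide
  · rw [key '1' h]; decide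
  · rw [key '2' h]; decide
  · rw [key '3' h]; decide
  · rw [key '4' h]; decide
  · rw [key '5' h]; decide
  · rw [key '6' h]; decide
  · rw [key '7' h]; decide
  · rw [key '8' h]; decide
  · rw [key '9' h]; decide

-- B's inner fold skips placeholder squares without touching the state
theorem pvFoldDots (r : Int) (n : Nat) : ∀ (s : Int) (st : PySem.Set String × PySem.Set String),
    (PySem.List.enumerate (List.replicate n '.') s).foldl (pvStepB r) st = st := by
  induction n with
  | zero => intro s st; simp [PySem.List.enumerate_nil]
  | succ m ih =>
      intro s st
      rw [List.replicate_succ, PySem.List.enumerate_cons, List.foldl_cons]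
      rw [ih]
      rfl

-- inner-loop equivalence: A's running file counter = index in B's expanded row
theorem pvInner (r : Int) (cs : List Char) : ∀ (w b : PySem.Set String) (f : Int),
    cs.foldl (pvStepA r) ((w, b), f)
      = ((PySem.List.enumerate (pvExpand cs) f).foldl (pvStepB r) (w, b),
         f + (pvExpand cs).length) := by
  induction cs with
  | nil => intro w b f; simp [pvExpand, PySem.List.enumerate_nil]
  | cons ch rest ih =>
      intro w b f
      have hexp : pvExpand (ch :: rest)
          = (if PySem.Chars.isdigit ch then
               PySem.List.pyRepeat ['.'] ((PySem.Int.ofChars? [ch]).getD 0) else [ch])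
            ++ pvExpand rest := by simp [pvExpand]
      by_cases hd : PySem.Chars.isdigit ch = true
      · have hv := pvOfCharsDigit ch hd
        have h48 : 48 ≤ (ch.toNat : Int) := by
          have hd' := hd
          simp [PySem.Chars.isdigit, Char.le_def] at hd'
          rw [UInt32.le_iff_toNat_le] at hd'
          have e1 : (48:UInt32).toNat = 48 := rfl
          have h48n : 48 ≤ ch.val.toNat := by omega
          have h48c : 48 ≤ ch.toNat := h48n
          exact_mod_cast h48c
        have hval : (PySem.Int.ofChars? [ch]).getD 0 = (ch.toNat : Int) - 48 := by
          rw [hv]; rfl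
        have hnn : 0 ≤ (ch.toNat : Int) - 48 := by omega
        rw [List.foldl_cons]
        have hstep : pvStepA r ((w, b), f) ch = ((w, b), f + ((ch.toNat : Int) - 48)) := by
          simp [pvStepA, hd, hval]
        rw [hstep, ih, hexp]
        rw [if_pos hd, PySem.List.pyRepeat_singleton, hval]
        rw [PySem.List.enumerate_append, List.foldl_append, pvFoldDots]
        have hlen : ((List.replicate ((ch.toNat : Int) - 48).toNat '.').length : Int)
            = (ch.toNat : Int) - 48 := by
          rw [List.length_replicate]; omega
        rw [List.length_append]
        push_cast [List.length_replicate]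
        rw [Int.toNat_of_nonneg hnn]
        simp [add_assoc]
      · rw [List.foldl_cons]
        have hstep : pvStepA r ((w, b), f)  ch
            = (pvStepB r (w, b) (f, ch), f + 1) := by
          simp [pvStepA, pvStepB, hd]
          by_cases hB : ch = 'B' <;> by_cases hb : ch = 'b' <;> simp [hB, hb]
        rw [hstep, ih, hexp, if_neg hd]
        rw [List.singleton_append, PySem.List.enumerate_cons, List.foldl_cons]
        simp [Prod.ext_iff]
        omega

-- ===== VERDICT (by name: the statement is the Claim_ definition above) =====
theorem bishop_colors_from_board_py_spec : Claim_equal_bishop_colors_from_board_py := by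
  intro board _
  unfold Spec_bishop_colors_from_board_py bishop_colors_from_board_py bishop_colors_from_board_py_alt
  congr 1
  funext st p
  obtain ⟨w, b⟩ := st
  rw [pvInner]
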